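-- pv_equiv track=rewrite | github.com/y123shiva/kids-content-engine | app/services/phoneme_aligner.py | _simple_word_to_phonemes
-- ===== SOURCE A (Python) =====
-- from typing import List, Tuple, Dict
--
-- def _simple_word_to_phonemes(word: str) -> List[str]:
--     """Convert a word to a simple phoneme-like sequence.
--
--     This is a heuristic: we break words by common phoneme patterns.
--     For true phoneme alignment, you'd use a grapheme-to-phoneme (G2P) model.
--     """
--     word = word.lower().strip()
--     if not word:
--         return []
--
--     phonemes = []
--     i = 0
--     while i < len(word):
--         # Check for digraphs
--         if i + 1 < len(word):
--             digraph = word[i : i + 2]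
--             if digraph in ("sh", "ch", "th", "zh", "ng"):
--                 phonemes.append(digraph)
--                 i += 2
--                 continue
--
--         # Single character
--         phonemes.append(word[i])
--         i += 1
--
--     return phonemes
-- ===== SOURCE B (Python) =====
-- from typing import List
--
-- _DIGRAPHS = {"sh", "ch", "th", "zh", "ng"}
--
-- def _simple_word_to_phonemes(word: str) -> List[str]:
--     """Convert a word to a simple phoneme-like sequence.
--
--     One pass over the characters with a one-character pending buffer:
--     a pending character fuses with the current one when they form a digraph,
--     otherwise it is emitted on its own.
--     """
--     phonemes: List[str] = []
--     pending = ""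
--     for c in word.lower().strip():
--         if pending and pending + c in _DIGRAPHS:
--             phonemes.append(pending + c)
--             pending = ""
--         else:
--             if pending:
--                 phonemes.append(pending)
--             pending = c
--     if pending:
--         phonemes.append(pending)
--     return phonemes
-- ===== Notes on version B (the rewrite author's own statement) =====
-- stated objective: alternative
-- what changed: Replaces the index-based while loop with two-character lookahead slicing and a continue by a single for-loop over the characters carrying a one-character pending buffer that either fuses with the next character into a digraph or is flushed; the empty-string guard disappears.
import Mathlib
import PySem

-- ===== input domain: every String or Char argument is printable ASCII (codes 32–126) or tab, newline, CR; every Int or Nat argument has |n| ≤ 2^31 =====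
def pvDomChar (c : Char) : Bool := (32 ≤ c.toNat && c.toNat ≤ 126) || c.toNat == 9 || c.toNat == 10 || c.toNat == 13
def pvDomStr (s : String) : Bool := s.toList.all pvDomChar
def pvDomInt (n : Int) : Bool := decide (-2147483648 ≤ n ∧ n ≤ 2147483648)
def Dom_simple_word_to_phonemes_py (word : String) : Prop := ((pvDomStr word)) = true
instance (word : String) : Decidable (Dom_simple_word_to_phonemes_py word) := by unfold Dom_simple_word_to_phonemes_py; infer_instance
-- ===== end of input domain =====

-- B replaces A's index-based while loop with lookahead by a single fold carrying a
-- one-character pending buffer (objective: alternative, same cost).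

-- ===== PORT A =====
-- the tuple ("sh","ch","th","zh","ng") of A, as char lists (string equality = char-list equality)
def pvDigraphsA : List (List Char) := [['s','h'], ['c','h'], ['t','h'], ['z','h'], ['n','g']]

-- the while loop of A: index i over the stripped lowered word, appending to `phonemes`
def pvALoop (w : List Char) (i : Nat) (phonemes : List String) : List String :=
  if h : i < w.length then
    if h2 : i + 1 < w.length then
      -- digraph = word[i:i+2]; for i+1 < len this slice is exactly [w[i], w[i+1]]
      let digraph := [w[i], w[i+1]]
      if digraph ∈ pvDigraphsA then
        pvALoop w (i + 2) (phonemes ++ [String.ofList digraph])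
      else
        pvALoop w (i + 1) (phonemes ++ [String.ofList [w[i]]])
    else
      pvALoop w (i + 1) (phonemes ++ [String.ofList [w[i]]])
  else phonemes
termination_by w.length - i

def simple_word_to_phonemes_py (word : String) : List String :=
  let w := PySem.Chars.strip (PySem.Chars.lower word.toList)
  if w = [] then [] else pvALoop w 0 []

-- ===== PORT B =====
-- the set _DIGRAPHS of Source B, as char lists
def pvDigraphsB : List (List Char) := [['s','h'], ['c','h'], ['t','h'], ['z','h'], ['n','g']]

-- body of B's for loop: state = (phonemes, pending); pending = "" ↦ [], pending = c ↦ [c]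
def pvBStep (st : List String × List Char) (c : Char) : List String × List Char :=
  let (phonemes, pending) := st
  if pending ≠ [] ∧ (pending ++ [c]) ∈ pvDigraphsB then
    (phonemes ++ [String.ofList (pending ++ [c])], [])
  else
    ((if pending ≠ [] then phonemes ++ [String.ofList pending] else phonemes), [c])

def simple_word_to_phonemes_py_alt (word : String) : List String :=
  let st := (PySem.Chars.strip (PySem.Chars.lower word.toList)).foldl pvBStep ([], [])
  if st.2 ≠ [] then st.1 ++ [String.ofList st.2] else st.1

-- ===== PRECONDITION & SPEC =====
def Spec_simple_word_to_phonemes_py (word : String) (out : List String) : Prop := out = simple_word_to_phonemes_py_alt word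
instance (word : String) (out : List String) : Decidable (Spec_simple_word_to_phonemes_py word out) := by unfold Spec_simple_word_to_phonemes_py; infer_instance

-- ===== CLAIM (what is proved, stated in full; the proofs are below) =====
def Claim_equal_simple_word_to_phonemes_py : Prop := ∀ (word : String), Dom_simple_word_to_phonemes_py word → Spec_simple_word_to_phonemes_py word (simple_word_to_phonemes_py word)

-- ===== LEMMAS AND PROOFS =====

-- reference greedy tokenizer both ports are reduced to
def pvTok : List Char → List String
  | [] => []
  | [a] => [String.ofList [a]]
  | a :: b :: rest =>
    if [a, b] ∈ pvDigraphsA then String.ofList [a, b] :: pvTok rest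
    else String.ofList [a] :: pvTok (b :: rest)

lemma pvALoop_eq_tok (w : List Char) : ∀ n i phonemes, w.length - i = n →
    pvALoop w i phonemes = phonemes ++ pvTok (w.drop i) := by
  intro n
  induction n using Nat.strong_induction_on with
  | _ n ih =>
    intro i phonemes hn
    rw [pvALoop]
    by_cases h : i < w.length
    · have hdrop : w.drop i = w[i] :: w.drop (i + 1) := List.drop_eq_getElem_cons h
      by_cases h2 : i + 1 < w.length
      · have hdrop2 : w.drop (i + 1) = w[i+1] :: w.drop (i + 2) := List.drop_eq_getElem_cons h2
        simp only [h, h2, dif_pos]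
        by_cases hd : [w[i], w[i+1]] ∈ pvDigraphsA
        · rw [if_pos hd, ih (w.length - (i+2)) (by omega) (i+2) _ rfl]
          rw [hdrop, hdrop2, pvTok, if_pos hd]
          simp
        · rw [if_neg hd, ih (w.length - (i+1)) (by omega) (i+1) _ rfl]
          rw [hdrop, hdrop2, pvTok, if_neg hd, ← hdrop2]
          simp
      · have hlast : w.drop (i + 1) = [] := List.drop_eq_nil_of_le (by omega)
        simp only [h, h2, dif_pos, dif_neg, not_false_iff]
        rw [ih (w.length - (i+1)) (by omega) (i+1) _ rfl]
        rw [hdrop, hlast]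
        simp [pvTok]
    · have hdrop : w.drop i = [] := List.drop_eq_nil_of_le (by omega)
      simp [h, hdrop, pvTok]

-- finalization of B's state
def pvBFin (st : List String × List Char) : List String :=
  if st.2 ≠ [] then st.1 ++ [String.ofList st.2] else st.1

lemma pvBFold_eq_tok (l : List Char) :
    (∀ phonemes, pvBFin (l.foldl pvBStep (phonemes, [])) = phonemes ++ pvTok l) ∧
    (∀ phonemes p, pvBFin (l.foldl pvBStep (phonemes, [p])) = phonemes ++ pvTok (p :: l)) := by
  induction l with
  | nil =>
    constructor
    · intro phonemes; simp [pvBFin, pvTok]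
    · intro phonemes p; simp [pvBFin, pvTok]
  | cons c rest ih =>
    constructor
    · intro phonemes
      have hstep : pvBStep (phonemes, []) c = (phonemes, [c]) := by simp [pvBStep]
      rw [List.foldl_cons, hstep, ih.2]
    · intro phonemes p
      by_cases hd : [p, c] ∈ pvDigraphsA
      · have hstep : pvBStep (phonemes, [p]) c = (phonemes ++ [String.ofList [p, c]], []) := by
          simp [pvBStep, pvDigraphsB]
          simp [pvDigraphsA] at hd
          tauto
        rw [List.foldl_cons, hstep, ih.1, pvTok, if_pos hd]
        simp
      · have hstep : pvBStep (phonemes, [p]) c = (phonemes ++ [String.ofList [p]], [c]) := by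
          simp [pvBStep, pvDigraphsB]
          simp [pvDigraphsA] at hd
          tauto
        rw [List.foldl_cons, hstep, ih.2, pvTok, if_neg hd]
        simp

-- ===== VERDICT (by name: the statement is the Claim_ definition above) =====
theorem simple_word_to_phonemes_py_spec : Claim_equal_simple_word_to_phonemes_py := by
  intro word _
  unfold Spec_simple_word_to_phonemes_py simple_word_to_phonemes_py simple_word_to_phonemes_py_alt
  set w := PySem.Chars.strip (PySem.Chars.lower word.toList) with hw
  have hB : pvBFin (w.foldl pvBStep ([], [])) = pvTok w := by
    simpa using (pvBFold_eq_tok w).1 []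
  by_cases h : w = []
  · simp [h]
  · simp only [h, if_neg, not_false_iff]
    rw [pvALoop_eq_tok w (w.length - 0) 0 [] rfl]
    simp [← hB, pvBFin]
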